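-- pv_equiv track=rewrite | github.com/mpenalozag/Project-Loki | search_problems/core/foundations/problems/sokoban/sokoban_problems.py | generate_possible_goals
-- ===== SOURCE A (Python) =====
-- import copy
--
-- def generate_possible_goals(goal):
--   goals = []
--   row_index = 0
--   for row in goal:
--     column_index = 0
--     for column in row:
--       if column == " ":
--         new_goal = copy.deepcopy(goal)
--         new_goal[row_index][column_index] = "A"
--         goals.append(new_goal)
--       column_index += 1
--     row_index += 1
--   return goals
-- ===== SOURCE B (Python) =====
-- def _row_variants(row):
--     # all versions of row with one blank replaced by "A", left to right
--     if not row: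
--         return []
--     c, rest = row[0], row[1:]
--     here = [["A"] + rest] if c == " " else []
--     return here + [[c] + v for v in _row_variants(rest)]
--
-- def generate_possible_goals(goal):
--     # structural recursion on the rows: variants of the head row (tail copied),
--     # then head copied onto every goal produced from the tail
--     if not goal:
--         return []
--     head, tail = goal[0], goal[1:]
--     here = [[v] + [r[:] for r in tail] for v in _row_variants(head)]
--     return here + [[head[:]] + g for g in generate_possible_goals(tail)]
-- ===== Notes on version B (the rewrite author's own statement) =====
-- stated objective: alternative
-- what changed: Replaces the index-counting nested loops with copy.deepcopy per blank by a structural recursion on the rows: a recursive helper enumerates the one-blank-replaced variants of a row, and the main function assembles each result grid as variant-row plus copied tail or copied head plus a recursively produced grid, never materialising any index.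
import Mathlib
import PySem

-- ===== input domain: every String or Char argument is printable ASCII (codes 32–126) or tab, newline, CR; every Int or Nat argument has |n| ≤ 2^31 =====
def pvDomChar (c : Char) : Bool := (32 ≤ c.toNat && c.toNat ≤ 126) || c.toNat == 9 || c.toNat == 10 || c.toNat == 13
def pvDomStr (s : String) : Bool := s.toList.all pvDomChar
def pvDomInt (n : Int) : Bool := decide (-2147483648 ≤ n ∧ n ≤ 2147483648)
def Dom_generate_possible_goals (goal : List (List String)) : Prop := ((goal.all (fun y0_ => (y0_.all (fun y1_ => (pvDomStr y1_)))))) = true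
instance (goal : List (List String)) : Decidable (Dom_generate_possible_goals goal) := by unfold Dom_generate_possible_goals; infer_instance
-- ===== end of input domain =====

-- B replaces A's index-counting loops + deepcopy per blank by structural recursion on the rows
-- (variants of the head row, head consed onto grids recursively built from the tail).

-- ===== PORT A =====
-- new_goal[row_index][column_index] = "A" on a deepcopy of goal (functional: goal with that cell set)
def pvSetCell (goal : List (List String)) (i j : Int) : List (List String) :=
  PySem.List.pySetD goal i (PySem.List.pySetD (PySem.List.pyGetD goal i []) j "A")

def generate_possible_goals (goal : List (List String)) : List (List (List String)) :=
  let outer := goal.foldl (fun (st : List (List (List String)) × Int) (row : List String) =>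
    let inner := row.foldl (fun (st2 : List (List (List String)) × Int) (column : String) =>
      if column = " " then (st2.1 ++ [pvSetCell goal st.2 st2.2], st2.2 + 1)
      else (st2.1, st2.2 + 1)) (st.1, 0)
    (inner.1, st.2 + 1)) ([], 0)
  outer.1

-- ===== PORT B =====
-- _row_variants: all versions of row with one blank replaced by "A", left to right
def pvRowVariants : List String → List (List String)
  | [] => []
  | c :: rest =>
    (if c = " " then [("A" : String) :: rest] else []) ++ (pvRowVariants rest).map (fun v => c :: v)

def generate_possible_goals_alt : List (List String) → List (List (List String))
  | [] => []
  | head :: tail =>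
    (pvRowVariants head).map (fun v => v :: tail)
      ++ (generate_possible_goals_alt tail).map (fun g => head :: g)

-- ===== PRECONDITION & SPEC =====
def Spec_generate_possible_goals (goal : List (List String)) (out : List (List (List String))) : Prop := out = generate_possible_goals_alt goal
instance (goal : List (List String)) (out : List (List (List String))) : Decidable (Spec_generate_possible_goals goal out) := by unfold Spec_generate_possible_goals; infer_instance

-- ===== CLAIM =====
def Claim_equal_generate_possible_goals : Prop := ∀ (goal : List (List String)), Dom_generate_possible_goals goal → Spec_generate_possible_goals goal (generate_possible_goals goal)

-- ===== LEMMAS AND PROOFS =====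

-- the per-row emission of A, characterised via enumerate/filterMap
theorem pv_inner_char (goal : List (List String)) (ri : Int) (row : List String)
    (gs : List (List (List String))) (c0 : Int) :
    row.foldl (fun (st2 : List (List (List String)) × Int) (column : String) =>
      if column = " " then (st2.1 ++ [pvSetCell goal ri st2.2], st2.2 + 1)
      else (st2.1, st2.2 + 1)) (gs, c0)
    = (gs ++ (PySem.List.enumerate row c0).filterMap
        (fun q => if q.2 = " " then some (pvSetCell goal ri q.1) else none),
       c0 + row.length) := by
  induction row generalizing gs c0 with
  | nil => simp [PySem.List.enumerate_nil]
  | cons c rest ih =>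
    simp only [List.foldl_cons, PySem.List.enumerate_cons, List.filterMap_cons]
    by_cases h : c = " " <;> simp [h, ih] <;> omega

theorem pv_outer_char (goal : List (List String)) (rows : List (List String))
    (gs : List (List (List String))) (r0 : Int) :
    (rows.foldl (fun (st : List (List (List String)) × Int) (row : List String) =>
      let inner := row.foldl (fun (st2 : List (List (List String)) × Int) (column : String) =>
        if column = " " then (st2.1 ++ [pvSetCell goal st.2 st2.2], st2.2 + 1)
        else (st2.1, st2.2 + 1)) (st.1, 0)
      (inner.1, st.2 + 1)) (gs, r0)).1
    = gs ++ (PySem.List.enumerate rows r0).flatMap (fun p =>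
        (PySem.List.enumerate p.2 0).filterMap
          (fun q => if q.2 = " " then some (pvSetCell goal p.1 q.1) else none)) := by
  induction rows generalizing gs r0 with
  | nil => simp [PySem.List.enumerate_nil]
  | cons r rest ih =>
    simp only [List.foldl_cons, PySem.List.enumerate_cons, List.flatMap_cons]
    rw [pv_inner_char]
    simp [ih]

-- blank positions of a row, as Nats
def pvBlanksN : List String → List Nat
  | [] => []
  | c :: rest => (if c = " " then [0] else []) ++ (pvBlanksN rest).map (· + 1)

-- the enumerate/filterMap blank scan equals a map over pvBlanksN
theorem pv_enum_blanks {α : Type} (row : List String) (c0 : Int) (f : Int → α) :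
    (PySem.List.enumerate row c0).filterMap
      (fun q => if q.2 = " " then some (f q.1) else none)
    = (pvBlanksN row).map (fun (j : Nat) => f (c0 + (j : Int))) := by
  induction row generalizing c0 with
  | nil => simp [PySem.List.enumerate_nil, pvBlanksN]
  | cons c rest ih =>
    have hmap : ((pvBlanksN rest).map (· + 1)).map (fun (j : Nat) => f (c0 + (j : Int)))
        = (pvBlanksN rest).map (fun (j : Nat) => f (c0 + 1 + (j : Int))) := by
      rw [List.map_map]
      refine List.map_congr_left (fun j _ => ?_)
      simp only [Function.comp_apply]
      congr 1
      push_cast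
      ring
    simp only [PySem.List.enumerate_cons, List.filterMap_cons, pvBlanksN,
      List.map_append, hmap, ih (c0 + 1)]
    by_cases h : c = " " <;> simp [h]

-- pvRowVariants equals setting each blank index
theorem pv_rowVariants_eq (row : List String) :
    pvRowVariants row = (pvBlanksN row).map (fun j => row.set j "A") := by
  induction row with
  | nil => rfl
  | cons c rest ih =>
    simp only [pvRowVariants, pvBlanksN, ih]
    by_cases h : c = " " <;> simp [h, Function.comp_def, List.set]

-- B equals the enumerate/flatMap characterisation of A
theorem pv_main (goal : List (List String)) :
    (PySem.List.enumerate goal 0).flatMap (fun p =>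
      (PySem.List.enumerate p.2 0).filterMap
        (fun q => if q.2 = " " then some (pvSetCell goal p.1 q.1) else none))
    = generate_possible_goals_alt goal := by
  induction goal with
  | nil => simp [PySem.List.enumerate_nil, generate_possible_goals_alt]
  | cons head tail ih =>
    -- shift lemma brought inline: first map the whole flatMap to Nat-indexed maps
    simp only [PySem.List.enumerate_cons, List.flatMap_cons]
    have h0 : (PySem.List.enumerate head 0).filterMap
        (fun q => if q.2 = " " then some (pvSetCell (head :: tail) 0 q.1) else none)
        = (pvRowVariants head).map (fun v => v :: tail) := by
      rw [pv_enum_blanks head 0 (fun j => pvSetCell (head :: tail) 0 j)]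
      rw [pv_rowVariants_eq, List.map_map]
      refine List.map_congr_left (fun j _ => ?_)
      show pvSetCell (head :: tail) 0 (0 + (j : Int)) = head.set j "A" :: tail
      rw [show (0 : Int) + (j : Int) = ((j : Nat) : Int) by omega,
        show (0 : Int) = ((0 : Nat) : Int) from rfl]
      unfold pvSetCell
      rw [PySem.List.pyGetD_natCast, PySem.List.pySetD_natCast, PySem.List.pySetD_natCast]
      simp [List.set]
    rw [h0]
    congr 1
    -- tail part: indices shifted by one
    have hshift : ∀ (xs : List (List String)) (c0 : Int),
        PySem.List.enumerate xs (c0 + 1)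
          = (PySem.List.enumerate xs c0).map (fun p => (p.1 + 1, p.2)) := by
      intro xs
      induction xs with
      | nil => intro c0; simp [PySem.List.enumerate_nil]
      | cons x rest ihx => intro c0; simp [PySem.List.enumerate_cons, ihx (c0 + 1)]
    rw [show (0 : Int) + 1 = (0 : Int) + 1 from rfl, hshift tail 0, List.flatMap_map]
    rw [← ih]
    rw [List.map_flatMap]
    refine List.flatMap_congr (fun p hp => ?_)
    rw [List.map_filterMap]
    refine List.filterMap_congr (fun q _ => ?_)
    by_cases h : q.2 = " " <;> simp only [h, if_true, if_false, Option.map_some, Option.map_none]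
    · -- pvSetCell (head :: tail) (p.1 + 1) q.1 = head :: pvSetCell tail p.1 q.1, p.1 ≥ 0
      obtain ⟨k, hk, rfl⟩ := (PySem.List.mem_enumerate_iff _ _ _).mp hp
      congr 1
      unfold pvSetCell
      rw [show (0 : Int) + (k : Int) + 1 = ((k + 1 : Nat) : Int) by omega,
        show (0 : Int) + (k : Int) = ((k : Nat) : Int) by omega,
        PySem.List.pyGetD_natCast, PySem.List.pyGetD_natCast,
        PySem.List.pySetD_natCast, PySem.List.pySetD_natCast]
      simp [List.set]

-- ===== VERDICT =====
theorem generate_possible_goals_spec : Claim_equal_generate_possible_goals := by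
  intro goal _
  unfold Spec_generate_possible_goals generate_possible_goals
  show ((goal.foldl _ (([] : List (List (List String))), (0 : Int))).1) = _
  rw [pv_outer_char goal goal [] 0, pv_main]
  simp
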